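-- pv_equiv track=rewrite | github.com/Hwesta/advent-of-code | aoc2016/day11.py | normalize_rep
-- ===== SOURCE A (Python) =====
-- import copy
--
-- def normalize_rep(floors, elevator):
--     # Normalize representation - convert
--     # [['BM', 'BG', 'CG'], ['CM'], ['AM', 'AG'], []]
--     # to
--     # [['AM', 'AG', 'BG'], ['BM'], ['CM', 'CG'], []]
--
--     pairs = set()
--     floors = copy.deepcopy(floors)
--     # Generate pairs
--     for i, floor in enumerate(floors):
--         for item in floor:
--             if item[1] == 'M':
--                 match = item[0] + "G"
--                 for j, search_floor in enumerate(floors):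
--                     if match in search_floor:
--                         pairs.add((i, j))
--     return (frozenset(pairs), elevator)
-- ===== SOURCE B (Python) =====
-- def normalize_rep(floors, elevator):
--     # One indexing pass: item -> ascending list of distinct floor indices holding it.
--     where = {}
--     for j, floor in enumerate(floors):
--         for item in dict.fromkeys(floor):
--             where.setdefault(item, []).append(j)
--     # Join pass: each microchip is paired with its generator's floors via the index.
--     pairs = set()
--     for i, floor in enumerate(floors):
--         for item in floor:
--             if item[1] == 'M':
--                 for j in where.get(item[0] + 'G', []):
--                     pairs.add((i, j))
--     return (frozenset(pairs), elevator)
-- ===== Notes on version B (the rewrite author's own statement) =====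
-- stated objective: faster
-- what changed: A rescans every floor (a membership scan per floor) for each microchip; B makes one indexing pass building a dict from item to the list of floors holding it, then joins each microchip with its generator's floors by a single dict lookup.
import Mathlib
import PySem

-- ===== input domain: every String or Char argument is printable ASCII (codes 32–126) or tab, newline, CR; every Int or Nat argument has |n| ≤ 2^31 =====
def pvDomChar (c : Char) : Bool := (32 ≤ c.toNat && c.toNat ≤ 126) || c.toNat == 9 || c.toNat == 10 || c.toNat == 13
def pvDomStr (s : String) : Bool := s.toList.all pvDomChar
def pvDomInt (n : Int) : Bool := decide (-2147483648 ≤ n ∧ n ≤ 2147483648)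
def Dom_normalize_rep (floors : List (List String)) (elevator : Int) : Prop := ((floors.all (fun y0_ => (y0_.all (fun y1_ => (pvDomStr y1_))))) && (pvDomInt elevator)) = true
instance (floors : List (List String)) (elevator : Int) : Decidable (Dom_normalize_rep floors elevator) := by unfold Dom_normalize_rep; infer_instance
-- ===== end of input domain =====

-- B replaces A's per-microchip rescan of all floors by a one-pass item->floors index
-- followed by a lookup join (objective: faster; fewer passes over the floors).


-- ===== PORT A =====
-- item[0] + "G"; the none branch is unreachable when item[1] exists (Pre_ excludes shorter items)
def pvMatchStr (item : String) : String :=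
  ((PySem.Str.pyGet? item 0).map (fun c => String.ofList [c, 'G'])).getD ""

def normalize_rep (floors : List (List String)) (elevator : Int) : (List (Int × Int)) × Int :=
  let pairs : PySem.Set (Int × Int) :=
    (PySem.List.enumerate floors).foldl (fun pairs iflr =>
      iflr.2.foldl (fun pairs item =>
        if PySem.Str.pyGet? item 1 = some 'M' then
          let mtch := pvMatchStr item
          (PySem.List.enumerate floors).foldl (fun pairs jflr =>
            if jflr.2.contains mtch then PySem.Set.add pairs (iflr.1, jflr.1) else pairs) pairs
        else pairs) pairs) PySem.Set.empty
  (pairs, elevator)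

-- ===== PORT B =====
-- where.setdefault(item, []).append(j)  is  where[item] = where.get(item, []) + [j]  =  Dict.modify
def pvBuildIdx (floors : List (List String)) : PySem.Dict String (List Int) :=
  (PySem.List.enumerate floors).foldl (fun d jflr =>
    (PySem.List.dedup jflr.2).foldl (fun d item =>
      d.modify item [] (· ++ [jflr.1])) d) PySem.Dict.empty

def normalize_rep_alt (floors : List (List String)) (elevator : Int) : (List (Int × Int)) × Int :=
  let whereIdx := pvBuildIdx floors
  let pairs : PySem.Set (Int × Int) :=
    (PySem.List.enumerate floors).foldl (fun pairs iflr =>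
      iflr.2.foldl (fun pairs item =>
        if PySem.Str.pyGet? item 1 = some 'M' then
          (whereIdx.getD (pvMatchStr item) []).foldl
            (fun pairs j => PySem.Set.add pairs (iflr.1, j)) pairs
        else pairs) pairs) PySem.Set.empty
  (pairs, elevator)

-- ===== PRECONDITION & SPEC =====
-- Pre_ excludes exactly the inputs where A raises: an item of length < 2 makes item[1] an IndexError.
def Pre_normalize_rep (floors : List (List String)) (elevator : Int) : Prop :=
  (floors.all (fun f => f.all (fun item => 2 ≤ item.toList.length))) = true
instance (floors : List (List String)) (elevator : Int) : Decidable (Pre_normalize_rep floors elevator) := by unfold Pre_normalize_rep; infer_instance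

def pvWitness_normalize_rep : List (List String) × Int := ([["BM", "BG", "CG"], ["CM"], ["AM", "AG"], []], 0)

def Spec_normalize_rep (floors : List (List String)) (elevator : Int) (out : (List (Int × Int)) × Int) : Prop := out = normalize_rep_alt floors elevator
instance (floors : List (List String)) (elevator : Int) (out : (List (Int × Int)) × Int) : Decidable (Spec_normalize_rep floors elevator out) := by unfold Spec_normalize_rep; infer_instance

-- ===== CLAIM (what is proved, stated in full; the proofs are below) =====
def Claim_equal_normalize_rep : Prop := ∀ (floors : List (List String)) (elevator : Int), Dom_normalize_rep floors elevator → Pre_normalize_rep floors elevator → Spec_normalize_rep floors elevator (normalize_rep floors elevator)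

-- ===== LEMMAS AND PROOFS =====

-- one floor's index pass: over the (deduplicated, hence Nodup) items, each key gains j at most once
lemma getD_foldl_modify_dedup (items : List String) (hnd : items.Nodup)
    (d : PySem.Dict String (List Int)) (j : Int) (m : String) :
    (items.foldl (fun d item => d.modify item [] (· ++ [j])) d).getD m []
      = d.getD m [] ++ (if m ∈ items then [j] else []) := by
  induction items generalizing d with
  | nil => simp
  | cons a tl ih =>
      rcases List.nodup_cons.mp hnd with ⟨ha, htl⟩
      simp only [List.foldl_cons, ih htl, PySem.Dict.getD_modify]
      by_cases hma : m = a
      · subst hma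
        simp [ha]
      · simp [hma, List.mem_cons]

-- the built index at key m lists exactly the floors containing m, in scan order
lemma getD_buildIdx_aux (fls : List (List String)) (s : Int) (m : String)
    (d : PySem.Dict String (List Int)) :
    ((PySem.List.enumerate fls s).foldl (fun d jflr =>
        (PySem.List.dedup jflr.2).foldl (fun d item => d.modify item [] (· ++ [jflr.1])) d) d).getD m []
      = d.getD m []
          ++ ((PySem.List.enumerate fls s).filter (fun p => p.2.contains m)).map (·.1) := by
  induction fls generalizing s d with
  | nil => simp [PySem.List.enumerate_nil]
  | cons f tl ih =>
      rw [PySem.List.enumerate_cons]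
      simp only [List.foldl_cons, List.filter_cons, ih]
      rw [getD_foldl_modify_dedup _ (PySem.List.nodup_dedup f) d s m]
      by_cases hm : m ∈ f
      · simp [hm]
      · simp [hm]

lemma getD_pvBuildIdx (floors : List (List String)) (m : String) :
    (pvBuildIdx floors).getD m []
      = ((PySem.List.enumerate floors).filter (fun p => p.2.contains m)).map (·.1) := by
  unfold pvBuildIdx
  rw [getD_buildIdx_aux]
  simp

-- ===== VERDICT (by name: the statement is the Claim_ definition above) =====
theorem normalize_rep_spec : Claim_equal_normalize_rep := by
  intro floors elevator _ _
  unfold Spec_normalize_rep normalize_rep normalize_rep_alt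
  refine congrArg (fun s => (s, elevator)) ?_
  apply PySem.List.foldl_congr_mem
  intro pairs iflr _
  apply PySem.List.foldl_congr_mem
  intro pairs item _
  by_cases hM : PySem.Str.pyGet? item 1 = some 'M'
  · simp only [hM, if_pos]
    rw [getD_pvBuildIdx, List.foldl_map]
    exact PySem.List.foldl_if_eq_foldl_filter
      (fun jflr : Int × List String => jflr.2.contains (pvMatchStr item))
      (fun pairs jflr => PySem.Set.add pairs (iflr.1, jflr.1))
      (PySem.List.enumerate floors) pairs
  · have hM' : ¬ PySem.List.pyGet? item.toList 1 = some 'M' := by simpa using hM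
    simp [hM']
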